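-- pv_equiv track=rewrite | github.com/GeoBau/conversiontool | api/index.py | consolidate_duplicates
-- ===== SOURCE A (Python) =====
-- from typing import Optional, Dict, List, Tuple
--
-- def consolidate_duplicates(results: List[Dict]) -> List[Dict]:
--     """
--     Consolidate duplicate results that have the same article numbers.
--     Takes longest bez1, longest bez2, and first warengruppe from each group.
--     """
--     if len(results) <= 1:
--         return results
--
--     # Group results by normalized number pair
--     groups = {}
--     for result in results:
--         num1 = result['input_number']
--         num2 = result['corresponding_number']
--         # Normalize: always put smaller number first for grouping
--         pair_key = tuple(sorted([num1, num2]))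
--
--         if pair_key not in groups:
--             groups[pair_key] = []
--         groups[pair_key].append(result)
--
--     # Consolidate each group
--     consolidated = []
--     for pair_key, group in groups.items():
--         # Take the first result as base
--         merged = group[0].copy()
--
--         # Find longest bez1
--         longest_bez1 = max(group, key=lambda x: len(x.get('bez1', '')))
--         merged['bez1'] = longest_bez1['bez1']
--
--         # Find longest bez2
--         longest_bez2 = max(group, key=lambda x: len(x.get('bez2', '')))
--         merged['bez2'] = longest_bez2['bez2']
--
--         # Find first non-empty warengruppe
--         for item in group:
--             if item.get('warengruppe', '').strip():
--                 merged['warengruppe'] = item['warengruppe']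
--                 merged['warengruppe_description'] = item.get('warengruppe_description', '')
--                 break
--
--         consolidated.append(merged)
--
--     return consolidated
-- ===== SOURCE B (Python) =====
-- def consolidate_duplicates(results):
--     if len(results) <= 1:
--         return results
--     # One pass: key -> [base, best_bez1_elem, best_bez2_elem, first_warengruppe_elem_or_None]
--     acc = {}
--     for r in results:
--         k = (r['input_number'], r['corresponding_number'])
--         if k[0] > k[1]:
--             k = (k[1], k[0])
--         st = acc.get(k)
--         if st is None:
--             acc[k] = [r, r, r, r if r.get('warengruppe', '').strip() else None]
--         else:
--             if len(r.get('bez1', '')) > len(st[1].get('bez1', '')):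
--                 st[1] = r
--             if len(r.get('bez2', '')) > len(st[2].get('bez2', '')):
--                 st[2] = r
--             if st[3] is None and r.get('warengruppe', '').strip():
--                 st[3] = r
--     out = []
--     for base, b1, b2, wg in acc.values():
--         m = base.copy()
--         m['bez1'] = b1['bez1']
--         m['bez2'] = b2['bez2']
--         if wg is not None:
--             m['warengruppe'] = wg['warengruppe']
--             m['warengruppe_description'] = wg.get('warengruppe_description', '')
--         out.append(m)
--     return out
-- ===== Notes on version B (the rewrite author's own statement) =====
-- stated objective: alternative
-- what changed: Replaces A's two-phase group-then-rescan (build lists per key, then run max() twice and a search loop over each group) with a single pass that keeps, per key, a running accumulator (base element, current longest-bez1 element, current longest-bez2 element, first non-empty-warengruppe element) and only finalizes each accumulator at the end.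
import Mathlib
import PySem

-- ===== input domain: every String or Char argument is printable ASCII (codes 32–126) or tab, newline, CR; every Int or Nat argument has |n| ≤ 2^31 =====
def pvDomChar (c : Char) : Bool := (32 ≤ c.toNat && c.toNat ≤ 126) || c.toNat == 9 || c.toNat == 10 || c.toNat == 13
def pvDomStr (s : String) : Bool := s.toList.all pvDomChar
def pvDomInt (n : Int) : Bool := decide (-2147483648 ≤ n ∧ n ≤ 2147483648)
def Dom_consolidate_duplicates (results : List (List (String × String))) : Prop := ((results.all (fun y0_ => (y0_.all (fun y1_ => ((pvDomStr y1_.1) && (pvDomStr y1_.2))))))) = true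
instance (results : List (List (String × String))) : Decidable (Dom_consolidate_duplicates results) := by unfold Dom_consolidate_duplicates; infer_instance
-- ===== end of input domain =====

-- B consolidates in ONE pass with per-key accumulators (base, longest-bez1, longest-bez2, first
-- warengruppe element) instead of A's group-lists followed by two max() rescans and a search loop;
-- same O(n) cost, alternative structure.

-- ===== PORT A =====
-- each element dict is an assoc list; result['k'] raising KeyError is excluded by Pre_, so it is
-- ported as getD with an unreachable "" default
def consolidate_duplicates (results : List (List (String × String))) : List (List (String × String)) :=
  if results.length ≤ 1 then results
  else
    -- group results by normalized number pair
    let groups : PySem.Dict (String × String) (List (List (String × String))) :=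
      results.foldl (fun g result =>
        let num1 := (PySem.Dict.ofList result).getD "input_number" ""
        let num2 := (PySem.Dict.ofList result).getD "corresponding_number" ""
        -- pair_key = tuple(sorted([num1, num2])) : Python str '<=' is Lean's '≤' on String
        let pair_key := if num1 ≤ num2 then (num1, num2) else (num2, num1)
        let g := if g.contains pair_key then g else g.insert pair_key []
        g.modify pair_key [] (fun l => l ++ [result]))   -- groups[pair_key].append(result)
        PySem.Dict.empty
    -- consolidate each group
    groups.items.foldl (fun consolidated kg =>
      let group := kg.2
      let merged := PySem.Dict.ofList (group.headD [])    -- group[0].copy(); groups' values are never empty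
      let longest_bez1 := (PySem.List.max? group (fun x => ((PySem.Dict.ofList x).getD "bez1" "").length)).getD []
      let merged := merged.insert "bez1" ((PySem.Dict.ofList longest_bez1).getD "bez1" "")
      let longest_bez2 := (PySem.List.max? group (fun x => ((PySem.Dict.ofList x).getD "bez2" "").length)).getD []
      let merged := merged.insert "bez2" ((PySem.Dict.ofList longest_bez2).getD "bez2" "")
      -- 'for item in group: if …: …; break' = first matching element
      let merged := match group.find? (fun item => PySem.Str.strip ((PySem.Dict.ofList item).getD "warengruppe" "") != "") with
        | some item => (merged.insert "warengruppe" ((PySem.Dict.ofList item).getD "warengruppe" "")).insert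
            "warengruppe_description" ((PySem.Dict.ofList item).getD "warengruppe_description" "")
        | none => merged
      consolidated ++ [merged.items]) []

-- ===== PORT B =====
-- accumulator per key: (base element, current longest-bez1 element, current longest-bez2 element,
-- first element with non-empty warengruppe or none)
def consolidate_duplicates_alt (results : List (List (String × String))) : List (List (String × String)) :=
  if results.length ≤ 1 then results
  else
    let acc : PySem.Dict (String × String)
        ((List (String × String)) × (List (String × String)) × (List (String × String)) × Option (List (String × String))) :=
      results.foldl (fun d r =>
        let k := ((PySem.Dict.ofList r).getD "input_number" "", (PySem.Dict.ofList r).getD "corresponding_number" "")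
        let k := if k.1 > k.2 then (k.2, k.1) else k
        -- 'st = acc.get(k); if st is None: … else: …'
        (d.get? k).elim
          (d.insert k (r, r, r,
            if PySem.Str.strip ((PySem.Dict.ofList r).getD "warengruppe" "") != "" then some r else none))
          (fun st =>
            let st1 := if ((PySem.Dict.ofList st.2.1).getD "bez1" "").length < ((PySem.Dict.ofList r).getD "bez1" "").length then r else st.2.1
            let st2 := if ((PySem.Dict.ofList st.2.2.1).getD "bez2" "").length < ((PySem.Dict.ofList r).getD "bez2" "").length then r else st.2.2.1
            -- 'if st[3] is None and …: st[3] = r'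
            let st3 := if st.2.2.2.isNone && (PySem.Str.strip ((PySem.Dict.ofList r).getD "warengruppe" "") != "") then some r else st.2.2.2
            d.insert k (st.1, st1, st2, st3)))
        PySem.Dict.empty
    acc.items.foldl (fun out kst =>
      let st := kst.2
      let m := PySem.Dict.ofList st.1
      let m := m.insert "bez1" ((PySem.Dict.ofList st.2.1).getD "bez1" "")
      let m := m.insert "bez2" ((PySem.Dict.ofList st.2.2.1).getD "bez2" "")
      let m := match st.2.2.2 with
        | some w => (m.insert "warengruppe" ((PySem.Dict.ofList w).getD "warengruppe" "")).insert
            "warengruppe_description" ((PySem.Dict.ofList w).getD "warengruppe_description" "")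
        | none => m
      out ++ [m.items]) []

-- ===== PRECONDITION & SPEC =====
-- Pre_ excludes lists of length ≥ 2 in which some element dict lacks one of the keys
-- input_number / corresponding_number / bez1 / bez2: on such inputs A's direct indexing in general
-- raises KeyError (in the corner where the max() winner still owns bez1/bez2, A returns and B
-- returns the same value).
def Pre_consolidate_duplicates (results : List (List (String × String))) : Prop :=
  results.length ≤ 1 ∨ ∀ r ∈ results,
    (PySem.Dict.ofList r).contains "input_number" = true ∧
    (PySem.Dict.ofList r).contains "corresponding_number" = true ∧
    (PySem.Dict.ofList r).contains "bez1" = true ∧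
    (PySem.Dict.ofList r).contains "bez2" = true
instance (results : List (List (String × String))) : Decidable (Pre_consolidate_duplicates results) := by
  unfold Pre_consolidate_duplicates; infer_instance

def pvWitness_consolidate_duplicates : (List (List (String × String))) :=
  [[("input_number", "7"), ("corresponding_number", "3"), ("bez1", "a"), ("bez2", ""), ("warengruppe", " ")],
   [("input_number", "3"), ("corresponding_number", "7"), ("bez1", "ab"), ("bez2", "c"), ("warengruppe", "W")]]

def Spec_consolidate_duplicates (results : List (List (String × String))) (out : List (List (String × String))) : Prop := out = consolidate_duplicates_alt results
instance (results : List (List (String × String))) (out : List (List (String × String))) : Decidable (Spec_consolidate_duplicates results out) := by unfold Spec_consolidate_duplicates; infer_instance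

-- ===== CLAIM (what is proved, stated in full; the proofs are below) =====
def Claim_equal_consolidate_duplicates : Prop := ∀ (results : List (List (String × String))), Dom_consolidate_duplicates results → Pre_consolidate_duplicates results → Spec_consolidate_duplicates results (consolidate_duplicates results)

-- ===== LEMMAS AND PROOFS =====

-- ---- proof-only helpers ----
abbrev pvR : Type := List (String × String)
abbrev pvS : Type := pvR × pvR × pvR × Option pvR

def pvKey (r : pvR) : String × String :=
  let n1 := (PySem.Dict.ofList r).getD "input_number" ""
  let n2 := (PySem.Dict.ofList r).getD "corresponding_number" ""
  if n1 ≤ n2 then (n1, n2) else (n2, n1)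

def pvLen1 (x : pvR) : Nat := ((PySem.Dict.ofList x).getD "bez1" "").length
def pvLen2 (x : pvR) : Nat := ((PySem.Dict.ofList x).getD "bez2" "").length
def pvWg (x : pvR) : Bool := PySem.Str.strip ((PySem.Dict.ofList x).getD "warengruppe" "") != ""

def pvUpdA (o : Option (List pvR)) (r : pvR) : List pvR := o.getD [] ++ [r]

def pvUpdB (o : Option pvS) (r : pvR) : pvS :=
  match o with
  | none => (r, r, r, if pvWg r then some r else none)
  | some st =>
      (st.1,
       if pvLen1 st.2.1 < pvLen1 r then r else st.2.1,
       if pvLen2 st.2.2.1 < pvLen2 r then r else st.2.2.1,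
       match st.2.2.2 with
       | some w => some w
       | none => if pvWg r then some r else none)

def pvFold {S : Type} (upd : Option S → pvR → S) (l : List pvR)
    (d : PySem.Dict (String × String) S) : PySem.Dict (String × String) S :=
  l.foldl (fun d r => d.insert (pvKey r) (upd (d.get? (pvKey r)) r)) d

def pvMergeA (group : List pvR) : pvR :=
  let merged := PySem.Dict.ofList (group.headD [])
  let longest_bez1 := (PySem.List.max? group (fun x => ((PySem.Dict.ofList x).getD "bez1" "").length)).getD []
  let merged := merged.insert "bez1" ((PySem.Dict.ofList longest_bez1).getD "bez1" "")
  let longest_bez2 := (PySem.List.max? group (fun x => ((PySem.Dict.ofList x).getD "bez2" "").length)).getD []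
  let merged := merged.insert "bez2" ((PySem.Dict.ofList longest_bez2).getD "bez2" "")
  let merged := match group.find? (fun item => PySem.Str.strip ((PySem.Dict.ofList item).getD "warengruppe" "") != "") with
    | some item => (merged.insert "warengruppe" ((PySem.Dict.ofList item).getD "warengruppe" "")).insert
        "warengruppe_description" ((PySem.Dict.ofList item).getD "warengruppe_description" "")
    | none => merged
  merged.items

def pvMergeB (st : pvS) : pvR :=
  let m := PySem.Dict.ofList st.1
  let m := m.insert "bez1" ((PySem.Dict.ofList st.2.1).getD "bez1" "")
  let m := m.insert "bez2" ((PySem.Dict.ofList st.2.2.1).getD "bez2" "")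
  let m := match st.2.2.2 with
    | some w => (m.insert "warengruppe" ((PySem.Dict.ofList w).getD "warengruppe" "")).insert
        "warengruppe_description" ((PySem.Dict.ofList w).getD "warengruppe_description" "")
    | none => m
  m.items

-- A's loop body is an insert-at-key step
lemma pvStepA_eq (g : PySem.Dict (String × String) (List pvR)) (result : pvR) :
    (let num1 := (PySem.Dict.ofList result).getD "input_number" ""
     let num2 := (PySem.Dict.ofList result).getD "corresponding_number" ""
     let pair_key := if num1 ≤ num2 then (num1, num2) else (num2, num1)
     let g' := if g.contains pair_key then g else g.insert pair_key []
     g'.modify pair_key [] (fun l => l ++ [result]))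
    = g.insert (pvKey result) (pvUpdA (g.get? (pvKey result)) result) := by
  simp only [pvUpdA, PySem.Dict.modify]
  by_cases h : g.contains (pvKey result) = true
  · simp only [pvKey] at h ⊢
    rw [if_pos h, PySem.Dict.getD_eq_get?_getD g]
  · have hfalse : g.contains (pvKey result) = false := by simpa using h
    have hn : g.get? (pvKey result) = none := by
      rw [PySem.Dict.get?_eq_none_iff_contains]; exact hfalse
    simp only [pvKey] at hfalse hn ⊢
    rw [if_neg (by rw [hfalse]; simp), PySem.Dict.getD_insert_self, PySem.Dict.insert_insert_self, hn]
    rfl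

-- B's loop body is an insert-at-key step
lemma pvStepB_eq (d : PySem.Dict (String × String) pvS) (r : pvR) :
    (let k := ((PySem.Dict.ofList r).getD "input_number" "", (PySem.Dict.ofList r).getD "corresponding_number" "")
     let k := if k.1 > k.2 then (k.2, k.1) else k
     (d.get? k).elim
       (d.insert k (r, r, r,
         if PySem.Str.strip ((PySem.Dict.ofList r).getD "warengruppe" "") != "" then some r else none))
       (fun st =>
         let st1 := if ((PySem.Dict.ofList st.2.1).getD "bez1" "").length < ((PySem.Dict.ofList r).getD "bez1" "").length then r else st.2.1
         let st2 := if ((PySem.Dict.ofList st.2.2.1).getD "bez2" "").length < ((PySem.Dict.ofList r).getD "bez2" "").length then r else st.2.2.1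
         let st3 := if st.2.2.2.isNone && (PySem.Str.strip ((PySem.Dict.ofList r).getD "warengruppe" "") != "") then some r else st.2.2.2
         d.insert k (st.1, st1, st2, st3)))
    = d.insert (pvKey r) (pvUpdB (d.get? (pvKey r)) r) := by
  have hk : (let k := ((PySem.Dict.ofList r).getD "input_number" "", (PySem.Dict.ofList r).getD "corresponding_number" "")
      if k.1 > k.2 then (k.2, k.1) else k) = pvKey r := by
    simp only [pvKey]
    rcases le_or_gt ((PySem.Dict.ofList r).getD "input_number" "") ((PySem.Dict.ofList r).getD "corresponding_number" "") with h | h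
    · simp [not_lt.mpr h, h]
    · simp [h, not_le.mpr h]
  simp only [hk]
  cases hg : d.get? (pvKey r) with
  | none => simp [pvUpdB, pvWg]
  | some st =>
    simp only [Option.elim, pvUpdB, pvLen1, pvLen2, pvWg]
    congr 2
    cases hw : st.2.2.2 with
    | none => simp
    | some w => simp

lemma pv_get?_fold {S : Type} (upd : Option S → pvR → S) (l : List pvR)
    (d : PySem.Dict (String × String) S) (k : String × String) :
    (pvFold upd l d).get? k
      = (l.filter (fun r => pvKey r == k)).foldl (fun o r => some (upd o r)) (d.get? k) := by
  induction l generalizing d with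
  | nil => rfl
  | cons r t ih =>
    simp only [pvFold, List.foldl_cons, List.filter_cons] at *
    by_cases h : pvKey r = k
    · subst h
      simp only [beq_self_eq_true, if_true, List.foldl_cons]
      rw [ih, PySem.Dict.get?_insert_self]
    · have hb : (pvKey r == k) = false := by simpa using h
      rw [hb]
      simp only [Bool.false_eq_true, if_false]
      rw [ih, PySem.Dict.get?_insert_of_ne d _ (Ne.symm h)]

lemma pv_keys_fold {S : Type} (upd : Option S → pvR → S) (l : List pvR) :
    (pvFold upd l PySem.Dict.empty).keys = PySem.Set.ofList (l.map pvKey) := by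
  rw [pvFold, PySem.Dict.keys_foldl_insert_key]
  simp [PySem.Set.update_nil_left]

lemma pv_nodup_fold {S : Type} (upd : Option S → pvR → S) (l : List pvR) :
    (pvFold upd l PySem.Dict.empty).keys.Nodup := by
  rw [pv_keys_fold]
  exact PySem.Set.nodup_ofList _

lemma pv_foldl_some {S : Type} (upd : Option S → pvR → S) (l : List pvR) (s : S) :
    l.foldl (fun o r => some (upd o r)) (some s)
      = some (l.foldl (fun s r => upd (some s) r) s) := by
  induction l generalizing s with
  | nil => rfl
  | cons r t ih => simp only [List.foldl_cons]; exact ih _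

lemma pv_max?_foldl {κ : Type} [LinearOrder κ] (key : pvR → κ) (r : pvR) (t : List pvR) :
    PySem.List.max? (r :: t) key
      = some (t.foldl (fun m x => if key m < key x then x else m) r) := by
  induction t generalizing r with
  | nil => rfl
  | cons x t ih =>
    have h1 : PySem.List.max? (r :: x :: t) key
        = PySem.List.max? ((if key r < key x then x else r) :: t) key := by
      simp only [PySem.List.max?, List.foldl_cons]
      by_cases h : key r < key x
      · rw [if_pos h, if_pos h]
      · rw [if_neg h, if_neg h]
    rw [h1, ih, List.foldl_cons]

lemma pv_wg_fold_some (t : List pvR) (w : pvR) :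
    t.foldl (fun o x => match o with
      | some w' => some w'
      | none => if pvWg x then some x else none) (some w) = some w := by
  induction t with
  | nil => rfl
  | cons x t ih => simpa using ih

lemma pv_wg_fold_none (t : List pvR) :
    t.foldl (fun o x => match o with
      | some w' => some w'
      | none => if pvWg x then some x else none) none = t.find? pvWg := by
  induction t with
  | nil => rfl
  | cons x t ih =>
    simp only [List.foldl_cons]
    by_cases h : pvWg x
    · rw [if_pos h, pv_wg_fold_some, List.find?_cons_of_pos h]
    · rw [if_neg h, ih, List.find?_cons_of_neg (by simpa using h)]

lemma pv_foldB_components (t : List pvR) (s : pvS) :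
    t.foldl (fun s r => pvUpdB (some s) r) s
      = (s.1,
         t.foldl (fun m x => if pvLen1 m < pvLen1 x then x else m) s.2.1,
         t.foldl (fun m x => if pvLen2 m < pvLen2 x then x else m) s.2.2.1,
         t.foldl (fun o x => match o with
           | some w' => some w'
           | none => if pvWg x then some x else none) s.2.2.2) := by
  induction t generalizing s with
  | nil => rfl
  | cons x t ih =>
    simp only [List.foldl_cons]
    rw [ih]
    rfl

lemma pv_perkey (r : pvR) (t : List pvR) :
    pvMergeA (r :: t) = pvMergeB (t.foldl (fun s x => pvUpdB (some s) x) (pvUpdB none r)) := by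
  rw [pv_foldB_components]
  simp only [pvMergeA, pvMergeB, List.headD_cons]
  rw [pv_max?_foldl (fun x => ((PySem.Dict.ofList x).getD "bez1" "").length),
      pv_max?_foldl (fun x => ((PySem.Dict.ofList x).getD "bez2" "").length)]
  simp only [pvUpdB, pvLen1, pvLen2, Option.getD_some]
  have hp : (fun item => PySem.Str.strip ((PySem.Dict.ofList item).getD "warengruppe" "") != "") = pvWg := rfl
  rw [hp]
  by_cases h : pvWg r
  · rw [if_pos h, pv_wg_fold_some, List.find?_cons_of_pos h]
    rfl
  · rw [if_neg h, pv_wg_fold_none, List.find?_cons_of_neg (by simpa using h)]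
    cases t.find? pvWg <;> rfl

lemma pv_main (results : List pvR) :
    (pvFold pvUpdA results PySem.Dict.empty).items.foldl (fun acc kg => acc ++ [pvMergeA kg.2]) []
      = (pvFold pvUpdB results PySem.Dict.empty).items.foldl (fun out kst => out ++ [pvMergeB kst.2]) [] := by
  rw [PySem.List.foldl_append_singleton_eq_map, PySem.List.foldl_append_singleton_eq_map,
      PySem.Dict.items_eq_map_keys _ (pv_nodup_fold pvUpdA results) ([] : List pvR),
      PySem.Dict.items_eq_map_keys _ (pv_nodup_fold pvUpdB results) (([], [], [], none) : pvS),
      List.map_map, List.map_map, pv_keys_fold, pv_keys_fold]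
  simp only [List.nil_append]
  apply List.map_congr_left
  intro k hk
  obtain ⟨r, hr, hkr⟩ : ∃ r ∈ results, pvKey r = k := by
    have h1 := (PySem.Set.mem_ofList _ _).mp hk
    simpa using h1
  have hmem : r ∈ results.filter (fun x => pvKey x == k) := by
    simp [List.mem_filter, hr, hkr]
  obtain ⟨r0, t, hft⟩ : ∃ r0 t, results.filter (fun x => pvKey x == k) = r0 :: t := by
    cases hfe : results.filter (fun x => pvKey x == k) with
    | nil => rw [hfe] at hmem; cases hmem
    | cons a b => exact ⟨a, b, rfl⟩
  have hgA : (pvFold pvUpdA results PySem.Dict.empty).get? k = some (r0 :: t) := by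
    rw [pv_get?_fold, hft]
    simp only [PySem.Dict.get?_empty, List.foldl_cons]
    rw [pv_foldl_some]
    have h2 : t.foldl (fun s r => pvUpdA (some s) r) (pvUpdA none r0) = [r0] ++ t := by
      have h3 : (fun (s : List pvR) r => pvUpdA (some s) r) = fun s r => s ++ [r] := rfl
      rw [h3]
      exact PySem.List.foldl_append_singleton_eq_self t [r0]
    rw [h2]
    rfl
  have hgB : (pvFold pvUpdB results PySem.Dict.empty).get? k
      = some (t.foldl (fun s x => pvUpdB (some s) x) (pvUpdB none r0)) := by
    rw [pv_get?_fold, hft]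
    simp only [PySem.Dict.get?_empty, List.foldl_cons]
    rw [pv_foldl_some]
  simp only [Function.comp]
  rw [PySem.Dict.getD_eq_get?_getD, PySem.Dict.getD_eq_get?_getD, hgA, hgB]
  simp only [Option.getD_some]
  exact pv_perkey r0 t


-- ===== VERDICT (by name: the statement is the Claim_ definition above) =====
theorem consolidate_duplicates_spec : Claim_equal_consolidate_duplicates := by
  unfold Claim_equal_consolidate_duplicates
  intro results _hdom _hpre
  unfold Spec_consolidate_duplicates consolidate_duplicates consolidate_duplicates_alt
  by_cases hlen : results.length ≤ 1
  · rw [if_pos hlen, if_pos hlen]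
  · rw [if_neg hlen, if_neg hlen,
        PySem.List.foldl_congr_mem results _ _ PySem.Dict.empty (fun acc x _ => pvStepA_eq acc x),
        PySem.List.foldl_congr_mem results _ _ PySem.Dict.empty (fun acc x _ => pvStepB_eq acc x)]
    exact pv_main results
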